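-- pv_equiv track=rewrite | github.com/DavePie/lem-in | duplicate.py | find_common_nodes
-- ===== SOURCE A (Python) =====
-- def extract_nodes_from_path(path):
--     """
--     Extract individual nodes from a path string of the format 'Node1 -> Node2 -> Node3'.
--     """
--     return path.split(' -> ')
--
-- def find_common_nodes(paths):
--     """
--     Find all common nodes across the paths. Returns a set of common nodes.
--     """
--     seen_nodes = set()
--     common_nodes = set()
--
--     for path in paths:
--         nodes = extract_nodes_from_path(path)
--
--         for node in nodes:
--             if node in seen_nodes:
--                 common_nodes.add(node)
--             else:
--                 seen_nodes.add(node)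
--
--     return common_nodes
-- ===== SOURCE B (Python) =====
-- def extract_nodes_from_path(path):
--     """
--     Extract individual nodes from a path string of the format 'Node1 -> Node2 -> Node3'.
--     """
--     return path.split(' -> ')
--
-- def first_occurrence_index(seq):
--     """Map each node to the index of its first occurrence in seq."""
--     first = {}
--     for i, node in enumerate(seq):
--         first.setdefault(node, i)
--     return first
--
-- def find_common_nodes(paths):
--     """
--     Find all common nodes across the paths. Returns a set of common nodes.
--     """
--     seq = [node for path in paths for node in extract_nodes_from_path(path)]
--     first = first_occurrence_index(seq)
--     return {node for i, node in enumerate(seq) if first[node] != i}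
-- ===== Notes on version B (the rewrite author's own statement) =====
-- stated objective: alternative
-- what changed: B flattens all paths into one node sequence, builds a first-occurrence index table in one pass, and then filters out the first occurrences, replacing A's single stateful pass that promotes nodes between two mutable sets on second sight.
import Mathlib
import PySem

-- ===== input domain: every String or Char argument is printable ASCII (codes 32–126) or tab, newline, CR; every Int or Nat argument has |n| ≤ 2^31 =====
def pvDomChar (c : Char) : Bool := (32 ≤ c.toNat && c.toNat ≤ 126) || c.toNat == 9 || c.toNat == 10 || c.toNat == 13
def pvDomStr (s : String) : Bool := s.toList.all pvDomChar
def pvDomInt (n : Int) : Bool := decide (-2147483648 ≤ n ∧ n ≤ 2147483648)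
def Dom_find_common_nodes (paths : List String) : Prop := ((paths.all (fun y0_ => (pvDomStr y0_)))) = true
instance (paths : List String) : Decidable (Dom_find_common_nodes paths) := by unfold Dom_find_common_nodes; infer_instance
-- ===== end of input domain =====

-- B flattens the paths, builds a first-occurrence index table once, then filters the non-first
-- occurrences, replacing A's stateful two-set single pass; both Pythons return a set, serialized
-- here in the order both computations provably share.

-- ===== PORT A =====
-- path.split(' -> '): separator is a nonempty literal, so split? is never none; getD [] is unreachable
def extract_nodes_from_path (path : String) : List String :=
  (PySem.Str.split? path " -> ").getD []

def find_common_nodes (paths : List String) : List String :=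
  (paths.foldl
    (fun (st : PySem.Set String × PySem.Set String) path =>
      (extract_nodes_from_path path).foldl
        (fun st node =>
          if st.1.contains node then (st.1, st.2.add node)
          else (st.1.add node, st.2)) st)
    (PySem.Set.empty, PySem.Set.empty)).2

-- ===== PORT B =====
def first_occurrence_index (seq : List String) : PySem.Dict String Int :=
  (PySem.List.enumerate seq).foldl (fun first p => first.setdefault p.2 p.1) PySem.Dict.empty

-- first[node]: the key is always present (first is built over the same seq), so getD 0 is exact
def find_common_nodes_alt (paths : List String) : List String :=
  let seq := paths.flatMap (fun path => extract_nodes_from_path path)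
  let first := first_occurrence_index seq
  PySem.Set.ofList
    (((PySem.List.enumerate seq).filter (fun p => first.getD p.2 0 != p.1)).map (·.2))

-- ===== PRECONDITION & SPEC =====
def Spec_find_common_nodes (paths : List String) (out : List String) : Prop := out = find_common_nodes_alt paths
instance (paths : List String) (out : List String) : Decidable (Spec_find_common_nodes paths out) := by unfold Spec_find_common_nodes; infer_instance

-- ===== CLAIM (what is proved, stated in full; the proofs are below) =====
def Claim_equal_find_common_nodes : Prop := ∀ (paths : List String), Dom_find_common_nodes paths → Spec_find_common_nodes paths (find_common_nodes paths)

-- ===== LEMMAS AND PROOFS =====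

-- canonical middle form: the nodes of seq that already occur earlier in seq, in order
def pvDups (seq : List String) : List String :=
  ((PySem.List.enumerate seq).filter
      (fun p => (List.take p.1.toNat seq).contains p.2)).map (·.2)

lemma pvDups_append (seq : List String) (x : String) :
    pvDups (seq ++ [x]) = pvDups seq ++ (if x ∈ seq then [x] else []) := by
  unfold pvDups
  rw [PySem.List.enumerate_append, List.filter_append, List.map_append]
  congr 1
  · apply congrArg
    apply List.filter_congr
    intro p hp
    rcases (PySem.List.mem_enumerate_iff seq 0 p).1 hp with ⟨k, hk, rfl⟩
    simp only [Int.zero_add, Int.toNat_natCast]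
    rw [List.take_append_of_le_length (le_of_lt hk)]
  · simp only [PySem.List.enumerate_cons, PySem.List.enumerate_nil, Int.zero_add,
      List.filter_cons, List.filter_nil, Int.toNat_natCast]
    rw [List.take_append_of_le_length (le_refl _), List.take_length]
    by_cases hx : x ∈ seq
    · simp [hx]
    · simp [hx]

lemma pvLoop_eq (seq : List String) :
    seq.foldl
      (fun (st : PySem.Set String × PySem.Set String) node =>
        if st.1.contains node then (st.1, st.2.add node)
        else (st.1.add node, st.2))
      (PySem.Set.empty, PySem.Set.empty)
    = (PySem.Set.ofList seq, PySem.Set.ofList (pvDups seq)) := by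
  induction seq using List.reverseRecOn with
  | nil => rfl
  | append_singleton seq x ih =>
    rw [List.foldl_append, ih, pvDups_append]
    simp only [List.foldl_cons, List.foldl_nil]
    by_cases hx : x ∈ seq
    · have hx' : x ∈ PySem.Set.ofList seq := (PySem.Set.mem_ofList seq x).2 hx
      have hc : (PySem.Set.ofList seq).contains x = true :=
        (PySem.Set.contains_iff _ x).2 hx'
      rw [if_pos hx]
      simp only [hc, if_true]
      rw [PySem.Set.ofList_append_singleton, PySem.Set.ofList_append_singleton,
          PySem.Set.add_of_mem hx']
    · have hc : ¬ (PySem.Set.ofList seq).contains x = true := by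
        rw [PySem.Set.contains_iff, PySem.Set.mem_ofList]; exact hx
      rw [if_neg hx, List.append_nil]
      simp only [hc]
      rw [PySem.Set.ofList_append_singleton]
      rfl

-- the first-occurrence table maps each node of seq to its idxOf, and knows exactly seq's nodes
lemma pvFirst_spec (seq : List String) :
    (∀ node, (first_occurrence_index seq).contains node = true ↔ node ∈ seq) ∧
    (∀ node, node ∈ seq →
      (first_occurrence_index seq).getD node 0 = (seq.idxOf node : Int)) := by
  induction seq using List.reverseRecOn with
  | nil => exact ⟨fun node => by simp [first_occurrence_index], fun node h => by simp at h⟩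
  | append_singleton seq x ih =>
    have hstep : first_occurrence_index (seq ++ [x])
        = (first_occurrence_index seq).setdefault x (seq.length : Int) := by
      unfold first_occurrence_index
      rw [PySem.List.enumerate_append, List.foldl_append]
      simp [PySem.List.enumerate_cons, PySem.List.enumerate_nil]
    by_cases hx : x ∈ seq
    · have hc : (first_occurrence_index seq).contains x = true := (ih.1 x).2 hx
      have hsd : first_occurrence_index (seq ++ [x]) = first_occurrence_index seq := by
        rw [hstep]; simp [PySem.Dict.setdefault, hc]
      refine ⟨fun node => ?_, fun node hmem => ?_⟩
      · rw [hsd, ih.1 node]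
        simp only [List.mem_append, List.mem_singleton]
        constructor
        · exact Or.inl
        · rintro (h | rfl)
          · exact h
          · exact hx
      · have hmem' : node ∈ seq := by
          rcases List.mem_append.1 hmem with h | h
          · exact h
          · simp at h; subst h; exact hx
        rw [hsd, ih.2 node hmem', List.idxOf_append, if_pos hmem']
    · have hc : (first_occurrence_index seq).contains x = false :=
        Bool.eq_false_iff.2 (fun h => hx ((ih.1 x).1 h))
      have hsd : first_occurrence_index (seq ++ [x])
          = (first_occurrence_index seq).insert x (seq.length : Int) := by
        rw [hstep]; simp [PySem.Dict.setdefault, PySem.Dict.insert, hc]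
      refine ⟨fun node => ?_, fun node hmem => ?_⟩
      · rw [hsd, PySem.Dict.contains_insert]
        simp only [List.mem_append, List.mem_singleton, Bool.or_eq_true, beq_iff_eq]
        rw [ih.1 node]
        tauto
      · rw [hsd, PySem.Dict.getD_insert]
        by_cases hnx : node = x
        · subst hnx
          rw [if_pos rfl, List.idxOf_append, if_neg hx]
          simp
        · have hmem' : node ∈ seq := by
            rcases List.mem_append.1 hmem with h | h
            · exact h
            · simp at h; exact absurd h hnx
          rw [if_neg hnx, ih.2 node hmem', List.idxOf_append, if_pos hmem']

-- B's filter picks exactly the nodes with an earlier occurrence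
lemma pvAlt_filter_eq (seq : List String) :
    ((PySem.List.enumerate seq).filter
        (fun p => (first_occurrence_index seq).getD p.2 0 != p.1)).map (·.2)
      = pvDups seq := by
  unfold pvDups
  apply congrArg
  apply List.filter_congr
  intro p hp
  rcases (PySem.List.mem_enumerate_iff seq 0 p).1 hp with ⟨k, hk, rfl⟩
  simp only [Int.zero_add, Int.toNat_natCast]
  have hmem : seq[k] ∈ seq := List.getElem_mem hk
  rw [(pvFirst_spec seq).2 seq[k] hmem]
  have hle : seq.idxOf seq[k] ≤ k := by
    have h1 : seq[k] ∈ seq.take (k + 1) := by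
      have h2 : (seq.take (k+1))[k]'(by simp [hk]) = seq[k] := List.getElem_take
      exact h2 ▸ List.getElem_mem _
    have := (List.mem_take_iff_idxOf_lt hmem).1 h1
    omega
  have hiff : seq[k] ∈ seq.take k ↔ seq.idxOf seq[k] < k :=
    List.mem_take_iff_idxOf_lt hmem
  by_cases h : seq.idxOf seq[k] = k
  · have hnot : seq[k] ∉ seq.take k := fun hm => absurd (hiff.1 hm) (by omega)
    simp [h, List.contains_eq_mem, hnot]
  · have hlt : seq.idxOf seq[k] < k := lt_of_le_of_ne hle h
    have hmemtake : seq[k] ∈ seq.take k := hiff.2 hlt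
    have hne : ((seq.idxOf seq[k] : Int)) ≠ (k : Int) := by exact_mod_cast h
    simp [List.contains_eq_mem, hmemtake, bne_iff_ne, hne]

-- ===== VERDICT (by name: the statement is the Claim_ definition above) =====
theorem find_common_nodes_spec : Claim_equal_find_common_nodes := by
  intro paths _
  unfold Spec_find_common_nodes find_common_nodes find_common_nodes_alt
  rw [← List.foldl_flatMap, pvLoop_eq]
  simp only []
  rw [pvAlt_filter_eq]
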